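-- pv_equiv track=rewrite | github.com/BattleforAzeroth/SANAR | data_processing/java_tokenizing.py | get_pair
-- ===== SOURCE A (Python) =====
-- import functools
-- from operator import add
--
-- def get_pair(token_lines, type_lines, input_stmt_len):
--     input_stmt_len = min(input_stmt_len, len(token_lines)-1)
--     if input_stmt_len == 0:
--         return [], [], [], []
--     token_inp = []
--     type_inp = []
--     for i in range(len(token_lines) - input_stmt_len):
--         token_inp.append(functools.reduce(add, token_lines[i:i+input_stmt_len]))
--         type_inp.append(functools.reduce(add, type_lines[i:i+input_stmt_len]))
--     token_tar = token_lines[input_stmt_len:]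
--     type_tar = type_lines[input_stmt_len:]
--
--     assert len(token_inp) == len(token_tar)
--     assert len(type_inp) == len(type_tar)
--     assert len(token_inp) == len(type_inp)
--     return token_inp, type_inp, token_tar, type_tar
-- ===== SOURCE B (Python) =====
-- def get_pair(token_lines, type_lines, input_stmt_len):
--     L = min(input_stmt_len, len(token_lines) - 1)
--     if L == 0:
--         return [], [], [], []
--     n = len(token_lines)
--     tok_win = [t for line in token_lines[:L] for t in line]
--     typ_win = [t for line in type_lines[:L] for t in line]
--     token_inp = [tok_win]
--     type_inp = [typ_win]
--     for i in range(1, n - L):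
--         tok_win = tok_win[len(token_lines[i - 1]):] + token_lines[i + L - 1]
--         typ_win = typ_win[len(type_lines[i - 1]):] + type_lines[i + L - 1]
--         token_inp.append(tok_win)
--         type_inp.append(typ_win)
--     return token_inp, type_inp, token_lines[L:], type_lines[L:]
-- ===== Notes on version B (the rewrite author's own statement) =====
-- stated objective: faster
-- what changed: B maintains one running window concatenation and slides it (drop the leaving line, append the entering line) instead of rebuilding each window's concatenation from scratch with reduce(add, slice).
-- outside the precondition, e.g. on get_pair([['a'], ['b']], [['x']], 1): A raises AssertionError, B returns ([['a']], [['x']], [['b']], []); on get_pair([], [], 3): A raises TypeError, B returns ([[]], [[]], [], [])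
import Mathlib
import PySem

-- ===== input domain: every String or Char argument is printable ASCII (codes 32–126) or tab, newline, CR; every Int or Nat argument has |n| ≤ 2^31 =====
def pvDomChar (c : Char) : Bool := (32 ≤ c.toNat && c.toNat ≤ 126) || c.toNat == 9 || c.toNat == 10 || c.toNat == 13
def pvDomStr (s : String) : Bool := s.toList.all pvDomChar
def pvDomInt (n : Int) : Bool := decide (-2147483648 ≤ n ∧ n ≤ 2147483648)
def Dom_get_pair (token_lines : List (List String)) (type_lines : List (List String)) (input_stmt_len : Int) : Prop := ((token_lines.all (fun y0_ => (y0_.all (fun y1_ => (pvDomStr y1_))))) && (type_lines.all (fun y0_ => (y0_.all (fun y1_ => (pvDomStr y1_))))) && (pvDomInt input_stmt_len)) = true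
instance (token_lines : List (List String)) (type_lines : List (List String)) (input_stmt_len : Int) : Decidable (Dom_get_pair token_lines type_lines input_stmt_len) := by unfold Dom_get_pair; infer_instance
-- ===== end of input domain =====

-- B slides one maintained window concatenation (drop the leaving line, append the entering one)
-- instead of rebuilding every window with reduce(add, slice): fewer cells copied per window.

-- ===== PORT A =====
-- functools.reduce(add, xs): Python raises TypeError on xs = []; that case is outside Pre_.
def pvReduceAdd (xs : List (List String)) : List String :=
  match xs with
  | [] => []
  | h :: t => t.foldl (fun a b => a ++ b) h

def get_pair (token_lines : List (List String)) (type_lines : List (List String)) (input_stmt_len : Int) : List (List String) × List (List String) × List (List String) × List (List String) :=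
  let L := min input_stmt_len ((token_lines.length : Int) - 1)
  if L = 0 then ([], [], [], [])
  else
    let acc := (PySem.List.pyRange 0 ((token_lines.length : Int) - L) 1).foldl
      (fun (acc : List (List String) × List (List String)) i =>
        (acc.1 ++ [pvReduceAdd (PySem.List.slice token_lines (some i) (some (i + L)))],
         acc.2 ++ [pvReduceAdd (PySem.List.slice type_lines (some i) (some (i + L)))]))
      ([], [])
    (acc.1, acc.2, PySem.List.slice token_lines (some L) none,
     PySem.List.slice type_lines (some L) none)

-- ===== PORT B =====
-- loop body of Source B's for-loop (state = (tok_win, typ_win, token_inp, type_inp))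
def pvSlideStep (token_lines : List (List String)) (type_lines : List (List String)) (L : Int)
    (st : List String × List String × List (List String) × List (List String)) (i : Int) :
    List String × List String × List (List String) × List (List String) :=
  let tw := PySem.List.slice st.1 (some ((PySem.List.pyGetD token_lines (i - 1) []).length : Int)) none
              ++ PySem.List.pyGetD token_lines (i + L - 1) []
  let yw := PySem.List.slice st.2.1 (some ((PySem.List.pyGetD type_lines (i - 1) []).length : Int)) none
              ++ PySem.List.pyGetD type_lines (i + L - 1) []
  (tw, yw, st.2.2.1 ++ [tw], st.2.2.2 ++ [yw])

def get_pair_alt (token_lines : List (List String)) (type_lines : List (List String)) (input_stmt_len : Int) : List (List String) × List (List String) × List (List String) × List (List String) :=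
  let L := min input_stmt_len ((token_lines.length : Int) - 1)
  if L = 0 then ([], [], [], [])
  else
    let tok0 := (PySem.List.slice token_lines none (some L)).flatten
    let typ0 := (PySem.List.slice type_lines none (some L)).flatten
    let st := (PySem.List.pyRange 1 ((token_lines.length : Int) - L) 1).foldl
      (pvSlideStep token_lines type_lines L) (tok0, typ0, [tok0], [typ0])
    (st.2.2.1, st.2.2.2, PySem.List.slice token_lines (some L) none,
     PySem.List.slice type_lines (some L) none)

-- ===== PRECONDITION & SPEC =====
-- Pre_ excludes exactly the inputs where Python A raises: a negative effective window length
-- (TypeError: reduce on an empty slice) and, for a positive window, line lists of different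
-- lengths (AssertionError, or TypeError from an empty type-line slice).
def Pre_get_pair (token_lines : List (List String)) (type_lines : List (List String)) (input_stmt_len : Int) : Prop :=
  0 ≤ min input_stmt_len ((token_lines.length : Int) - 1) ∧
    (min input_stmt_len ((token_lines.length : Int) - 1) = 0 ∨
      token_lines.length = type_lines.length)
instance (token_lines : List (List String)) (type_lines : List (List String)) (input_stmt_len : Int) : Decidable (Pre_get_pair token_lines type_lines input_stmt_len) := by unfold Pre_get_pair; infer_instance

def pvWitness_get_pair : List (List String) × List (List String) × Int :=
  ([["a"], ["b"], ["c"]], [["x"], ["y"], ["z"]], 2)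

def Spec_get_pair (token_lines : List (List String)) (type_lines : List (List String)) (input_stmt_len : Int) (out : List (List String) × List (List String) × List (List String) × List (List String)) : Prop := out = get_pair_alt token_lines type_lines input_stmt_len
instance (token_lines : List (List String)) (type_lines : List (List String)) (input_stmt_len : Int) (out : List (List String) × List (List String) × List (List String) × List (List String)) : Decidable (Spec_get_pair token_lines type_lines input_stmt_len out) := by unfold Spec_get_pair; infer_instance

-- ===== CLAIM (what is proved, stated in full; the proofs are below) =====
def Claim_equal_get_pair : Prop := ∀ (token_lines : List (List String)) (type_lines : List (List String)) (input_stmt_len : Int), Dom_get_pair token_lines type_lines input_stmt_len → Pre_get_pair token_lines type_lines input_stmt_len → Spec_get_pair token_lines type_lines input_stmt_len (get_pair token_lines type_lines input_stmt_len)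

-- ===== LEMMAS AND PROOFS =====

-- window k of width ℓ, flattened
def pvWin (ℓ : Nat) (xs : List (List String)) (k : Nat) : List String :=
  ((xs.drop k).take ℓ).flatten

theorem foldl_append_eq_flatten_aux (t : List (List String)) :
    ∀ h : List String, t.foldl (fun a b => a ++ b) h = h ++ t.flatten := by
  induction t with
  | nil => intro h; simp
  | cons x t ih => intro h; simp [List.foldl_cons, ih, List.append_assoc]

theorem pvReduceAdd_eq_flatten (xs : List (List String)) : pvReduceAdd xs = xs.flatten := by
  cases xs with
  | nil => rfl
  | cons h t => simp [pvReduceAdd, foldl_append_eq_flatten_aux]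

theorem foldl_pair_append {α : Type} (f g : α → List String) (l : List α)
    (ab : List (List String) × List (List String)) :
    l.foldl (fun acc x => (acc.1 ++ [f x], acc.2 ++ [g x])) ab
      = (ab.1 ++ l.map f, ab.2 ++ l.map g) := by
  induction l generalizing ab with
  | nil => simp
  | cons x l ih => simp [List.foldl_cons, ih]

theorem win_step (ℓ : Nat) (xs : List (List String)) (k : Nat)
    (hℓ : 1 ≤ ℓ) (hk : k + ℓ < xs.length) :
    (pvWin ℓ xs k).drop (xs.getD k []).length ++ xs.getD (k + ℓ) [] = pvWin ℓ xs (k + 1) := by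
  obtain ⟨m, rfl⟩ : ∃ m, ℓ = m + 1 := ⟨ℓ - 1, by omega⟩
  have hkN : k < xs.length := by omega
  have hkm : k + 1 + m < xs.length := by omega
  have hdrop : xs.drop k = xs[k] :: xs.drop (k + 1) := List.drop_eq_getElem_cons hkN
  have hget1 : xs.getD k [] = xs[k] := List.getD_eq_getElem xs [] hkN
  have hget2 : xs.getD (k + (m + 1)) [] = xs[k + 1 + m] := by
    have : k + (m + 1) = k + 1 + m := by omega
    rw [this]; exact List.getD_eq_getElem xs [] hkm
  have hidx : (xs.drop (k + 1))[m]? = some xs[k + 1 + m] := by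
    rw [List.getElem?_drop]
    exact List.getElem?_eq_getElem hkm
  rw [pvWin, pvWin, hdrop, List.take_succ_cons, List.flatten_cons, hget1, hget2,
    List.drop_left, List.take_add_one, List.flatten_append, hidx]
  simp

theorem slide_fold (tok typ : List (List String)) (ℓ : Nat) (hℓ : 1 ≤ ℓ)
    (hm : typ.length = tok.length) :
    ∀ (t c : Nat) (a b : List (List String)), 1 ≤ c → c + t + ℓ = tok.length →
      (PySem.List.pyRange (c : Int) ((c : Int) + (t : Int)) 1).foldl
          (pvSlideStep tok typ (ℓ : Int))
          (pvWin ℓ tok (c - 1), pvWin ℓ typ (c - 1), a, b)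
        = (pvWin ℓ tok (c + t - 1), pvWin ℓ typ (c + t - 1),
           a ++ (List.range t).map (fun k => pvWin ℓ tok (c + k)),
           b ++ (List.range t).map (fun k => pvWin ℓ typ (c + k))) := by
  intro t
  induction t with
  | zero =>
    intro c a b hc hN
    rw [PySem.List.pyRange_one_eq_nil (by omega)]
    simp
  | succ s ih =>
    intro c a b hc hN
    have hlt : (c : Int) < (c : Int) + ((s + 1 : Nat) : Int) := by push_cast; omega
    rw [PySem.List.pyRange_one_cons hlt, List.foldl_cons]
    have wt : (pvWin ℓ tok (c - 1)).drop (tok.getD (c - 1) []).length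
        ++ tok.getD (c - 1 + ℓ) [] = pvWin ℓ tok c := by
      have h := win_step ℓ tok (c - 1) hℓ (by omega)
      rwa [show c - 1 + 1 = c by omega] at h
    have wy : (pvWin ℓ typ (c - 1)).drop (typ.getD (c - 1) []).length
        ++ typ.getD (c - 1 + ℓ) [] = pvWin ℓ typ c := by
      have h := win_step ℓ typ (c - 1) hℓ (by omega)
      rwa [show c - 1 + 1 = c by omega] at h
    have h1 : (c : Int) - 1 = ((c - 1 : Nat) : Int) := by omega
    have h2 : (c : Int) + (ℓ : Int) - 1 = ((c - 1 + ℓ : Nat) : Int) := by push_cast; omega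
    have hstep : pvSlideStep tok typ (ℓ : Int)
        (pvWin ℓ tok (c - 1), pvWin ℓ typ (c - 1), a, b) (c : Int)
        = (pvWin ℓ tok c, pvWin ℓ typ c, a ++ [pvWin ℓ tok c], b ++ [pvWin ℓ typ c]) := by
      simp only [pvSlideStep, h1, h2, PySem.List.pyGetD_natCast,
        PySem.List.slice_from_natCast, wt, wy]
    rw [hstep]
    have hrange : PySem.List.pyRange ((c : Int) + 1) ((c : Int) + ((s + 1 : Nat) : Int)) 1
        = PySem.List.pyRange (((c + 1 : Nat)) : Int) (((c + 1 : Nat) : Int) + ((s : Nat) : Int)) 1 := by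
      norm_num
      ring_nf
    have ih' := ih (c + 1) (a ++ [pvWin ℓ tok c]) (b ++ [pvWin ℓ typ c]) (by omega) (by omega)
    simp only [Nat.add_sub_cancel] at ih'
    rw [hrange, ih']
    have hidx : c + 1 + s - 1 = c + (s + 1) - 1 := by omega
    have hmapt : pvWin ℓ tok c :: (List.range s).map (fun k => pvWin ℓ tok (c + 1 + k))
        = (List.range (s + 1)).map (fun k => pvWin ℓ tok (c + k)) := by
      rw [List.range_succ_eq_map, List.map_cons, List.map_map]
      refine congrArg₂ _ (by simp) (List.map_congr_left ?_)
      intro k _; simp [Function.comp]; ring_nf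
    have hmapy : pvWin ℓ typ c :: (List.range s).map (fun k => pvWin ℓ typ (c + 1 + k))
        = (List.range (s + 1)).map (fun k => pvWin ℓ typ (c + k)) := by
      rw [List.range_succ_eq_map, List.map_cons, List.map_map]
      refine congrArg₂ _ (by simp) (List.map_congr_left ?_)
      intro k _; simp [Function.comp]; ring_nf
    rw [hidx, List.append_assoc, List.append_assoc, List.singleton_append,
      List.singleton_append, hmapt, hmapy]

-- ===== VERDICT (by name: the statement is the Claim_ definition above) =====
theorem pvWin_zero (ℓ : Nat) (xs : List (List String)) :
    pvWin ℓ xs 0 = (xs.take ℓ).flatten := by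
  simp [pvWin]

theorem get_pair_spec : Claim_equal_get_pair := by
  intro tok typ L hdom hpre
  obtain ⟨h0, h1⟩ := hpre
  unfold Spec_get_pair
  by_cases hz : min L ((tok.length : Int) - 1) = 0
  · simp [get_pair, get_pair_alt, hz]
  · have hle : min L ((tok.length : Int) - 1) ≤ (tok.length : Int) - 1 := min_le_right _ _
    have hpos : 1 ≤ min L ((tok.length : Int) - 1) := by omega
    obtain ⟨ℓ, hcast⟩ : ∃ ℓ : Nat, min L ((tok.length : Int) - 1) = (ℓ : Int) :=
      ⟨(min L ((tok.length : Int) - 1)).toNat, by omega⟩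
    have hℓ1 : 1 ≤ ℓ := by omega
    have hlen : ℓ + 1 ≤ tok.length := by omega
    have hmeq : typ.length = tok.length := (h1.resolve_left hz).symm
    obtain ⟨t, ht⟩ : ∃ t : Nat, tok.length - ℓ = t + 1 := ⟨tok.length - ℓ - 1, by omega⟩
    have hz' : ¬((ℓ : Int) = 0) := by omega
    simp only [get_pair, get_pair_alt, hcast, if_neg hz']
    -- A side: the rebuild-each-window fold is a map of windows
    rw [foldl_pair_append]
    have hMa : (tok.length : Int) - (ℓ : Int) = ((tok.length - ℓ : Nat) : Int) := by omega
    have hmapwin : ∀ xs : List (List String),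
        (PySem.List.pyRange 0 ((tok.length : Int) - (ℓ : Int)) 1).map
            (fun i => pvReduceAdd (PySem.List.slice xs (some i) (some (i + (ℓ : Int)))))
          = (List.range (tok.length - ℓ)).map (fun k => pvWin ℓ xs k) := by
      intro xs
      rw [hMa, PySem.List.pyRange_one, List.map_map]
      simp only [sub_zero, Int.toNat_natCast]
      refine List.map_congr_left (fun k _ => ?_)
      simp only [Function.comp_apply, zero_add, pvReduceAdd_eq_flatten,
        PySem.List.slice_natCast_add, pvWin]
    rw [hmapwin tok, hmapwin typ]
    -- B side: the sliding fold
    have hMb : (tok.length : Int) - (ℓ : Int) = 1 + ((t : Nat) : Int) := by omega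
    have hsf := slide_fold tok typ ℓ hℓ1 hmeq t 1
      [(PySem.List.slice tok none (some (ℓ : Int))).flatten]
      [(PySem.List.slice typ none (some (ℓ : Int))).flatten]
      (by omega) (by omega)
    have hwt0 : pvWin ℓ tok (1 - 1) = (PySem.List.slice tok none (some (ℓ : Int))).flatten := by
      rw [PySem.List.slice_to_natCast, pvWin_zero]
    have hwy0 : pvWin ℓ typ (1 - 1) = (PySem.List.slice typ none (some (ℓ : Int))).flatten := by
      rw [PySem.List.slice_to_natCast, pvWin_zero]
    rw [hwt0, hwy0] at hsf
    simp only [Nat.cast_one] at hsf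
    rw [hMb, hsf]
    simp only [Prod.mk.injEq, List.nil_append]
    refine ⟨?_, ?_, trivial⟩
    · rw [ht, List.range_succ_eq_map, List.map_cons, List.map_map, List.singleton_append,
        show (PySem.List.slice tok none (some (ℓ : Int))).flatten = pvWin ℓ tok 0 from by
          simpa using hwt0.symm]
      refine congrArg₂ _ rfl (List.map_congr_left (fun k _ => ?_))
      simp only [Function.comp_apply]
      exact congrArg _ (by omega)
    · rw [ht, List.range_succ_eq_map, List.map_cons, List.map_map, List.singleton_append,
        show (PySem.List.slice typ none (some (ℓ : Int))).flatten = pvWin ℓ typ 0 from by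
          simpa using hwy0.symm]
      refine congrArg₂ _ rfl (List.map_congr_left (fun k _ => ?_))
      simp only [Function.comp_apply]
      exact congrArg _ (by omega)
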